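-- pv_equiv track=rewrite | github.com/zsenarchitect/EA_Dist_Lite | Apps/_revit/EnneaDuck.extension/EnneadTab.tab/Manage.panel/view_template_compare.pushbutton/html_report_generator.py | _create_difference_summary
-- ===== SOURCE A (Python) =====
-- def _create_difference_summary(override_data, all_template_values):
--     """
--     Create a summary string showing what properties have inconsistencies across templates.
--
--     Logic: For each property, check if there are ANY inconsistencies across templates.
--     If a property has inconsistencies, include it in the summary.
--
--     Args:
--         override_data: Dictionary containing override details for this template
--         all_template_values: Dictionary containing override data for all templates
--
--     Returns:
--         str: Summary string showing properties with inconsistencies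
--     """
--     try:
--         if not isinstance(override_data, dict):
--             return "Invalid Data"
--
--         # Properties to check for differences
--         properties_to_check = [
--             'projection_line_weight', 'projection_line_color', 'projection_line_pattern',
--             'projection_fill_pattern', 'projection_fill_color', 'transparency',
--             'cut_line_weight', 'cut_line_color', 'cut_line_pattern',
--             'cut_fill_pattern', 'cut_fill_color', 'halftone', 'detail_level'
--         ]
--
--         # Find properties that have inconsistencies across templates
--         inconsistent_properties = []
--
--         for prop in properties_to_check:
--             # Get all values for this property across all templates
--             all_values = []
--             for template_data in all_template_values.values():
--                 if isinstance(template_data, dict):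
--                     value = template_data.get(prop)
--                     if value is not None:
--                         all_values.append(value)
--
--             # Check if there are inconsistencies (more than one unique value)
--             if len(all_values) > 1:
--                 unique_values = set(all_values)
--                 if len(unique_values) > 1:
--                     # This property has inconsistencies
--                     inconsistent_properties.append(prop)
--
--         # Build summary of inconsistent properties
--         if not inconsistent_properties:
--             return "No Override"
--
--         summary_parts = []
--         for prop in inconsistent_properties:
--             if prop == 'projection_line_weight':
--                 summary_parts.append("Line Weight")
--             elif prop == 'projection_line_color':
--                 summary_parts.append("Line Color")
--             elif prop == 'projection_line_pattern':
--                 summary_parts.append("Line Pattern")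
--             elif prop == 'projection_fill_pattern':
--                 summary_parts.append("Fill Pattern")
--             elif prop == 'projection_fill_color':
--                 summary_parts.append("Fill Color")
--             elif prop == 'transparency':
--                 summary_parts.append("Transparency")
--             elif prop == 'cut_line_weight':
--                 summary_parts.append("Cut Line Weight")
--             elif prop == 'cut_line_color':
--                 summary_parts.append("Cut Line Color")
--             elif prop == 'cut_line_pattern':
--                 summary_parts.append("Cut Line Pattern")
--             elif prop == 'cut_fill_pattern':
--                 summary_parts.append("Cut Fill Pattern")
--             elif prop == 'cut_fill_color':
--                 summary_parts.append("Cut Fill Color")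
--             elif prop == 'halftone':
--                 summary_parts.append("Halftone")
--             elif prop == 'detail_level':
--                 summary_parts.append("Detail Level")
--
--         return "; ".join(summary_parts)
--
--     except Exception as e:
--         return "Error: {}".format(str(e))
-- ===== SOURCE B (Python) =====
-- def _create_difference_summary(override_data, all_template_values):
--     try:
--         if not isinstance(override_data, dict):
--             return "Invalid Data"
--
--         LABELS = [
--             ('projection_line_weight', "Line Weight"),
--             ('projection_line_color', "Line Color"),
--             ('projection_line_pattern', "Line Pattern"),
--             ('projection_fill_pattern', "Fill Pattern"),
--             ('projection_fill_color', "Fill Color"),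
--             ('transparency', "Transparency"),
--             ('cut_line_weight', "Cut Line Weight"),
--             ('cut_line_color', "Cut Line Color"),
--             ('cut_line_pattern', "Cut Line Pattern"),
--             ('cut_fill_pattern', "Cut Fill Pattern"),
--             ('cut_fill_color', "Cut Fill Color"),
--             ('halftone', "Halftone"),
--             ('detail_level', "Detail Level"),
--         ]
--
--         # Streaming baseline comparison: remember the first value seen for each
--         # property and the set of properties already confirmed inconsistent.
--         # A property is inconsistent iff some later value deviates from its baseline;
--         # no per-property value collections or uniqueness counting are ever built.
--         baseline = {}
--         differing = set()
--         for template_data in all_template_values.values():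
--             if not isinstance(template_data, dict):
--                 continue
--             for prop, _label in LABELS:
--                 if prop in differing:
--                     continue
--                 value = template_data.get(prop)
--                 if value is None:
--                     continue
--                 if prop not in baseline:
--                     baseline[prop] = value
--                 elif value != baseline[prop]:
--                     differing.add(prop)
--
--         parts = [label for prop, label in LABELS if prop in differing]
--         return "; ".join(parts) if parts else "No Override"
--
--     except Exception as e:
--         return "Error: {}".format(str(e))
-- ===== Notes on version B (the rewrite author's own statement) =====
-- stated objective: alternative
-- what changed: A re-scans all templates once per property, collecting every value into a list and then a set and counting unique values; B streams the templates once, keeping only a first-seen baseline value per property and a set of properties already proved inconsistent (a value deviating from its baseline), so no value collections or cardinality checks exist.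
import Mathlib
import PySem

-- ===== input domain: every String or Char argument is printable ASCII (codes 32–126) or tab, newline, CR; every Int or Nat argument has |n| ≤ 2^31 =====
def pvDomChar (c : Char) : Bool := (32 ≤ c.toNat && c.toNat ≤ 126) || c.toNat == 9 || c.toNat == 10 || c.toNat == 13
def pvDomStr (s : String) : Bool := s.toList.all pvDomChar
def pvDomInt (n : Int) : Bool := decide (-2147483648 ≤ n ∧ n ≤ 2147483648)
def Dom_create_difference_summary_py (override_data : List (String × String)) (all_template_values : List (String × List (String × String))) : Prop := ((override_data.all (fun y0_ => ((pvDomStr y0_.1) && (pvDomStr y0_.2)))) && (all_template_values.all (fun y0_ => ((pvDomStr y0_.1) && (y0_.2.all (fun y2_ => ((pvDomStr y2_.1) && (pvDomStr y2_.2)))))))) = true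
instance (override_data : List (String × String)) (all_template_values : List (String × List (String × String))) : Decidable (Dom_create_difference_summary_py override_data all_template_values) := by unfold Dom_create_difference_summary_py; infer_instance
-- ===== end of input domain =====

-- B replaces A's per-property rescans (collect every value, build a set, count unique
-- values) by one streaming pass over the templates that keeps only a first-seen baseline
-- value per property and a set of properties already confirmed inconsistent (a value
-- deviated from its baseline).  Objective: alternative (constant per-property state,
-- no value collections).  Under the type convention both parameters are dicts, so A's
-- isinstance guards are always true and the try/except never fires; the ports reflect that.

-- ===== PORT A =====
def pvPropertiesToCheck : List String :=
  ["projection_line_weight", "projection_line_color", "projection_line_pattern",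
   "projection_fill_pattern", "projection_fill_color", "transparency",
   "cut_line_weight", "cut_line_color", "cut_line_pattern",
   "cut_fill_pattern", "cut_fill_color", "halftone", "detail_level"]

-- A's if/elif chain: the label(s) appended to summary_parts for a given property name
def pvLabelChain (prop : String) : List String :=
  if prop == "projection_line_weight" then ["Line Weight"]
  else if prop == "projection_line_color" then ["Line Color"]
  else if prop == "projection_line_pattern" then ["Line Pattern"]
  else if prop == "projection_fill_pattern" then ["Fill Pattern"]
  else if prop == "projection_fill_color" then ["Fill Color"]
  else if prop == "transparency" then ["Transparency"]
  else if prop == "cut_line_weight" then ["Cut Line Weight"]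
  else if prop == "cut_line_color" then ["Cut Line Color"]
  else if prop == "cut_line_pattern" then ["Cut Line Pattern"]
  else if prop == "cut_fill_pattern" then ["Cut Fill Pattern"]
  else if prop == "cut_fill_color" then ["Cut Fill Color"]
  else if prop == "halftone" then ["Halftone"]
  else if prop == "detail_level" then ["Detail Level"]
  else []

def create_difference_summary_py (override_data : List (String × String)) (all_template_values : List (String × List (String × String))) : String :=
  let inconsistent_properties := pvPropertiesToCheck.foldl (fun acc prop =>
    -- inner loop: collect this property's value from every template
    let all_values := (PySem.Dict.mk all_template_values).values.foldl
      (fun vs template_data =>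
        match (PySem.Dict.mk template_data).get? prop with
        | some value => vs ++ [value]
        | none => vs) []
    if 1 < all_values.length then
      if 1 < (PySem.Set.ofList all_values).length then acc ++ [prop] else acc
    else acc) []
  if inconsistent_properties.isEmpty then "No Override"
  else PySem.Str.join "; "
    (inconsistent_properties.foldl (fun acc prop => acc ++ pvLabelChain prop) [])

-- ===== PORT B =====
def pvLabels : List (String × String) :=
  [("projection_line_weight", "Line Weight"),
   ("projection_line_color", "Line Color"),
   ("projection_line_pattern", "Line Pattern"),
   ("projection_fill_pattern", "Fill Pattern"),
   ("projection_fill_color", "Fill Color"),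
   ("transparency", "Transparency"),
   ("cut_line_weight", "Cut Line Weight"),
   ("cut_line_color", "Cut Line Color"),
   ("cut_line_pattern", "Cut Line Pattern"),
   ("cut_fill_pattern", "Cut Fill Pattern"),
   ("cut_fill_color", "Cut Fill Color"),
   ("halftone", "Halftone"),
   ("detail_level", "Detail Level")]

-- B's inner loop body: one (prop, label) entry against one template's dict,
-- updating (baseline, differing)
def pvAltStep (td : List (String × String))
    (st : PySem.Dict String String × PySem.Set String) (pl : String × String) :
    PySem.Dict String String × PySem.Set String :=
  if PySem.Set.contains st.2 pl.1 then st
  else match (PySem.Dict.mk td).get? pl.1 with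
    | none => st
    | some value =>
      match st.1.get? pl.1 with
      | none => (st.1.insert pl.1 value, st.2)
      | some b => if value ≠ b then (st.1, PySem.Set.add st.2 pl.1) else st

def create_difference_summary_py_alt (override_data : List (String × String)) (all_template_values : List (String × List (String × String))) : String :=
  -- one pass over the templates; state = (baseline : prop -> first value, differing : set of props)
  let st := (PySem.Dict.mk all_template_values).values.foldl
    (fun st template_data => pvLabels.foldl (pvAltStep template_data) st)
    (PySem.Dict.empty, PySem.Set.empty)
  let parts := (pvLabels.filter (fun pl => PySem.Set.contains st.2 pl.1)).map (·.2)
  if parts.isEmpty then "No Override" else PySem.Str.join "; " parts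

-- ===== PRECONDITION & SPEC =====
def Spec_create_difference_summary_py (override_data : List (String × String)) (all_template_values : List (String × List (String × String))) (out : String) : Prop := out = create_difference_summary_py_alt override_data all_template_values
instance (override_data : List (String × String)) (all_template_values : List (String × List (String × String))) (out : String) : Decidable (Spec_create_difference_summary_py override_data all_template_values out) := by unfold Spec_create_difference_summary_py; infer_instance

-- ===== CLAIM (what is proved, stated in full; the proofs are below) =====
def Claim_equal_create_difference_summary_py : Prop := ∀ (override_data : List (String × String)) (all_template_values : List (String × List (String × String))), Dom_create_difference_summary_py override_data all_template_values → Spec_create_difference_summary_py override_data all_template_values (create_difference_summary_py override_data all_template_values)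

-- ===== LEMMAS AND PROOFS =====

-- the values the templates tds carry for property prop, in template order
def pvVals (prop : String) (tds : List (List (String × String))) : List String :=
  tds.flatMap (fun td =>
    match (PySem.Dict.mk td).get? prop with
    | some value => [value]
    | none => [])

-- the per-property abstract machine B runs: (baseline value, confirmed differing)
def pvM (s : Option String × Bool) (v : String) : Option String × Bool :=
  if s.2 then s
  else match s.1 with
    | none => (some v, false)
    | some b => if v ≠ b then (some b, true) else s

-- === A-side lemmas ===

lemma pv_collect (prop : String) : ∀ (tds : List (List (String × String))) (vs : List String),
    tds.foldl (fun vs td =>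
      match (PySem.Dict.mk td).get? prop with
      | some value => vs ++ [value]
      | none => vs) vs = vs ++ pvVals prop tds := by
  intro tds
  induction tds with
  | nil => intro vs; simp [pvVals]
  | cons td rest ih =>
    intro vs
    simp only [List.foldl_cons, pvVals, List.flatMap_cons]
    cases (PySem.Dict.mk td).get? prop <;> simp [ih, pvVals]

lemma pv_len_foldl_add : ∀ (l : List String) (s : PySem.Set String),
    (l.foldl PySem.Set.add s).length ≤ s.length + l.length := by
  intro l
  induction l with
  | nil => intro s; simp
  | cons x rest ih =>
    intro s
    simp only [List.foldl_cons]
    refine le_trans (ih _) ?_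
    have hadd : (PySem.Set.add s x).length ≤ s.length + 1 := by
      unfold PySem.Set.add
      split <;> simp
    simp only [List.length_cons]
    omega

lemma pv_cond_iff (l : List String) :
    ((1 < l.length ∧ 1 < (PySem.Set.ofList l).length) ↔ 1 < (PySem.Set.ofList l).length) := by
  constructor
  · exact fun h => h.2
  · intro h
    refine ⟨?_, h⟩
    have := pv_len_foldl_add l []
    rw [PySem.Set.ofList_eq_foldl] at h
    simpa using lt_of_lt_of_le h (by simpa using this)

lemma pv_props_eq : pvPropertiesToCheck = pvLabels.map (·.1) := by decide

lemma pv_chain_label : ∀ pl ∈ pvLabels, pvLabelChain pl.1 = [pl.2] := by decide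

lemma pv_inconsistent (tds : List (List (String × String))) :
    pvPropertiesToCheck.foldl (fun acc prop =>
      let all_values := tds.foldl (fun vs template_data =>
        match (PySem.Dict.mk template_data).get? prop with
        | some value => vs ++ [value]
        | none => vs) []
      if 1 < all_values.length then
        if 1 < (PySem.Set.ofList all_values).length then acc ++ [prop] else acc
      else acc) []
    = (pvLabels.filter
        (fun pl => decide (1 < (PySem.Set.ofList (pvVals pl.1 tds)).length))).map (·.1) := by
  have hstep : ∀ (acc : List String) (prop : String),
      (let all_values := tds.foldl (fun vs template_data =>
        match (PySem.Dict.mk template_data).get? prop with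
        | some value => vs ++ [value]
        | none => vs) []
      if 1 < all_values.length then
        if 1 < (PySem.Set.ofList all_values).length then acc ++ [prop] else acc
      else acc)
      = if decide (1 < (PySem.Set.ofList (pvVals prop tds)).length) then acc ++ [prop] else acc := by
    intro acc prop
    simp only [pv_collect prop tds [], List.nil_append]
    by_cases h : 1 < (PySem.Set.ofList (pvVals prop tds)).length
    · have hl : 1 < (pvVals prop tds).length := ((pv_cond_iff _).mpr h).1
      simp [h, hl]
    · simp only [h, decide_false, Bool.false_eq_true, if_false]
      split_ifs <;> simp_all
  simp only [hstep]
  rw [pv_props_eq]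
  have := PySem.List.foldl_append_if
    (fun p => decide (1 < (PySem.Set.ofList (pvVals p tds)).length))
    (fun x : String => x) (pvLabels.map (·.1)) []
  simpa [List.filter_map, Function.comp_def] using this

-- === B-side lemmas ===

-- the projection of B's combined state onto one property
def pvProj (st : PySem.Dict String String × PySem.Set String) (p : String) :
    Option String × Bool :=
  (st.1.get? p, PySem.Set.contains st.2 p)

lemma pv_altStep_self (td : List (String × String)) (st) (pl : String × String) :
    pvProj (pvAltStep td st pl) pl.1
      = match (PySem.Dict.mk td).get? pl.1 with
        | none => pvProj st pl.1
        | some v => pvM (pvProj st pl.1) v := by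
  unfold pvAltStep pvProj pvM
  by_cases hd : pl.1 ∈ st.2
  · cases (PySem.Dict.mk td).get? pl.1 <;> simp [hd]
  · cases hg : (PySem.Dict.mk td).get? pl.1 with
    | none => simp [hd]
    | some v =>
      cases hb : st.1.get? pl.1 with
      | none => simp [hd, PySem.Dict.get?_insert_self]
      | some b =>
        by_cases hv : v = b
        · simp [hd, hb, hv]
        · simp [hd, hb, hv]

lemma pv_altStep_other (td : List (String × String)) (st) (pl : String × String)
    (p : String) (hne : p ≠ pl.1) :
    pvProj (pvAltStep td st pl) p = pvProj st p := by
  unfold pvAltStep pvProj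
  by_cases hd : pl.1 ∈ st.2
  · cases (PySem.Dict.mk td).get? pl.1 <;> simp [hd]
  · cases hg : (PySem.Dict.mk td).get? pl.1 with
    | none => simp [hd]
    | some v =>
      cases hb : st.1.get? pl.1 with
      | none => simp [hd, PySem.Dict.get?_insert, hne]
      | some b =>
        by_cases hv : v = b
        · simp [hd, hv]
        · simp [hd, hv, hne]

-- effect of B's inner loop (over a label list L with distinct property names) on one property
lemma pv_inner (td : List (String × String)) :
    ∀ (L : List (String × String)) (st), (L.map (·.1)).Nodup → ∀ (p : String),
    pvProj (L.foldl (pvAltStep td) st) p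
      = if p ∈ L.map (·.1) then
          (match (PySem.Dict.mk td).get? p with
           | none => pvProj st p
           | some v => pvM (pvProj st p) v)
        else pvProj st p := by
  intro L
  induction L with
  | nil => intro st _ p; simp
  | cons pl rest ih =>
    intro st hnd p
    simp only [List.map_cons, List.nodup_cons] at hnd
    simp only [List.foldl_cons, List.map_cons, List.mem_cons]
    by_cases hp : p = pl.1
    · subst hp
      rw [ih _ hnd.2 pl.1, if_neg hnd.1, pv_altStep_self, if_pos (Or.inl rfl)]
    · rw [ih _ hnd.2 p, pv_altStep_other td st pl p hp]
      by_cases hm : p ∈ rest.map (·.1)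
      · rw [if_pos hm, if_pos (Or.inr hm)]
      · rw [if_neg hm, if_neg (by tauto)]

-- the whole of B's double loop, per property: the abstract machine over that property's values
lemma pv_outer : ∀ (tds : List (List (String × String))) (st) (p : String),
    p ∈ pvLabels.map (·.1) →
    pvProj (tds.foldl (fun st td => pvLabels.foldl (pvAltStep td) st) st) p
      = (pvVals p tds).foldl pvM (pvProj st p) := by
  intro tds
  induction tds with
  | nil => intro st p _; simp [pvVals]
  | cons td rest ih =>
    intro st p hp
    simp only [List.foldl_cons, pvVals, List.flatMap_cons]
    rw [ih _ p hp, pv_inner td pvLabels st (by decide) p, if_pos hp]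
    cases (PySem.Dict.mk td).get? p <;> simp [pvVals]

lemma pv_M_true : ∀ (l : List String) (b : Option String),
    l.foldl pvM (b, true) = (b, true) := by
  intro l
  induction l with
  | nil => intro b; rfl
  | cons v rest ih => intro b; simp only [List.foldl_cons, pvM]; exact ih b

lemma pv_M_some : ∀ (l : List String) (h : String),
    l.foldl pvM (some h, false) = (some h, decide (∃ v ∈ l, v ≠ h)) := by
  intro l
  induction l with
  | nil => intro h; simp
  | cons v rest ih =>
    intro h
    by_cases hv : v = h
    · subst hv
      have hstep : pvM (some v, false) v = (some v, false) := by simp [pvM]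
      rw [List.foldl_cons, hstep, ih v]
      simp
    · have hstep : pvM (some h, false) v = (some h, true) := by simp [pvM, hv]
      rw [List.foldl_cons, hstep, pv_M_true]
      simp
      exact Or.inl hv

lemma pv_M_run : ∀ (l : List String),
    (l.foldl pvM (none, false)).2 = decide (1 < (PySem.Set.ofList l).length) := by
  intro l
  cases l with
  | nil => simp [PySem.Set.ofList]
  | cons h t =>
    have hiff : (∃ v ∈ t, v ≠ h) ↔ 1 < (PySem.Set.ofList (h :: t)).length := by
      constructor
      · rintro ⟨v, hv, hne⟩
        have h1 : h ∈ PySem.Set.ofList (h :: t) := by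
          rw [PySem.Set.mem_ofList]; exact List.mem_cons_self
        have h2 : v ∈ PySem.Set.ofList (h :: t) := by
          rw [PySem.Set.mem_ofList]; exact List.mem_cons_of_mem _ hv
        match hs : PySem.Set.ofList (h :: t) with
        | [] => rw [hs] at h1; cases h1
        | [x] =>
          rw [hs] at h1 h2
          simp only [List.mem_singleton] at h1 h2
          exact absurd (h2.trans h1.symm) hne
        | x :: y :: r => simp
      · intro hlen
        by_contra hall
        push_neg at hall
        have hsub : PySem.Set.ofList (h :: t) ⊆ [h] := by
          intro x hx
          rw [PySem.Set.mem_ofList] at hx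
          rcases List.mem_cons.mp hx with rfl | hx
          · exact List.mem_singleton.mpr rfl
          · exact List.mem_singleton.mpr (hall x hx)
        have hle := (List.subperm_of_subset (PySem.Set.nodup_ofList (h :: t)) hsub).length_le
        simp at hle
        omega
    have hstep : pvM (none, false) h = (some h, false) := by simp [pvM]
    rw [List.foldl_cons, hstep, pv_M_some]
    exact decide_eq_decide.mpr hiff

-- ===== VERDICT (by name: the statement is the Claim_ definition above) =====
theorem create_difference_summary_py_spec : Claim_equal_create_difference_summary_py := by
  intro od atv _
  unfold Spec_create_difference_summary_py
  unfold create_difference_summary_py create_difference_summary_py_alt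
  set tds := (PySem.Dict.mk atv).values with htds
  rw [pv_inconsistent tds]
  -- B's final differing-set test equals A's set-cardinality test, property by property
  have hfilter :
      pvLabels.filter (fun pl => PySem.Set.contains
          (tds.foldl (fun st td => pvLabels.foldl (pvAltStep td) st)
            (PySem.Dict.empty, PySem.Set.empty)).2 pl.1)
        = pvLabels.filter (fun pl => decide (1 < (PySem.Set.ofList (pvVals pl.1 tds)).length)) := by
    refine List.filter_congr fun pl hpl => ?_
    have hp : pl.1 ∈ pvLabels.map (·.1) := List.mem_map_of_mem hpl
    have := pv_outer tds (PySem.Dict.empty, PySem.Set.empty) pl.1 hp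
    have hc : PySem.Set.contains
        (tds.foldl (fun st td => pvLabels.foldl (pvAltStep td) st)
          (PySem.Dict.empty, PySem.Set.empty)).2 pl.1
        = ((pvVals pl.1 tds).foldl pvM (pvProj (PySem.Dict.empty, PySem.Set.empty) pl.1)).2 := by
      rw [← this]; rfl
    rw [hc]
    have hproj : pvProj (PySem.Dict.empty, PySem.Set.empty) pl.1 = (none, false) := by
      unfold pvProj; simp [PySem.Dict.get?_empty]
    rw [hproj, pv_M_run]
  simp only [hfilter]
  set fs := pvLabels.filter (fun pl => decide (1 < (PySem.Set.ofList (pvVals pl.1 tds)).length)) with hfs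
  have hempty : (fs.map (·.1)).isEmpty = (fs.map (·.2)).isEmpty := by cases fs <;> simp
  have hlabels : (fs.map (·.1)).foldl (fun acc prop => acc ++ pvLabelChain prop) []
      = fs.map (·.2) := by
    rw [PySem.List.foldl_append_eq_flatMap pvLabelChain (fs.map (·.1)) [], List.nil_append,
      List.flatMap_map]
    have : ∀ pl ∈ fs, pvLabelChain pl.1 = [pl.2] := fun pl hpl =>
      pv_chain_label pl (List.mem_of_mem_filter hpl)
    calc fs.flatMap (fun pl => pvLabelChain pl.1)
        = fs.flatMap (fun pl => [pl.2]) := by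
          rw [List.flatMap_def, List.flatMap_def]
          exact congrArg List.flatten (List.map_congr_left this)
      _ = fs.map (·.2) := Eq.symm List.map_eq_flatMap
  rw [hlabels, hempty]
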